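-- pv_equiv track=rewrite | github.com/srt-uncertainty-wind/code | wshrRelabelLight.py | find_var_idx
-- ===== SOURCE A (Python) =====
-- def find_var_idx(var_name, var_dict):
--     count = 0
--     for var_list in var_dict.values():
--         if var_name in var_list:
--             count += var_list.index(var_name)
--             return(count)
--         else:
--             count += len(var_list)
-- ===== SOURCE B (Python) =====
-- def find_var_idx(var_name, var_dict):
--     flat = [v for lst in var_dict.values() for v in lst]
--     return flat.index(var_name) if var_name in flat else None
-- ===== Notes on version B (the rewrite author's own statement) =====
-- stated objective: simpler
-- what changed: Replaces A's per-list early-stopping offset accumulation with flattening all lists once and taking a single index lookup on the flat sequence (returning None when absent).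
import Mathlib
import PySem

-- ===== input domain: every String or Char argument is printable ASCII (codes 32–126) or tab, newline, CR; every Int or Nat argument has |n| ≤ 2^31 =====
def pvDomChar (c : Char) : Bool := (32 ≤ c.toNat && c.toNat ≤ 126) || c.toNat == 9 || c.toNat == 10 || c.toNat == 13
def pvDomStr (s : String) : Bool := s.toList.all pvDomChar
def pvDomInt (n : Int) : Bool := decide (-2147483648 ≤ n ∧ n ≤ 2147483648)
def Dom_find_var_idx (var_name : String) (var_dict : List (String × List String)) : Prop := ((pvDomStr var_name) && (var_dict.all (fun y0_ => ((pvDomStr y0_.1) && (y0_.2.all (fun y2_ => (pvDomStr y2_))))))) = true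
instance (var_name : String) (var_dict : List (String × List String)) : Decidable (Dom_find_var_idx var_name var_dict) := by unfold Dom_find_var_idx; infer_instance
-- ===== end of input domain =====

-- B flattens all lists once and takes a single index lookup (None when absent), instead of A's
-- per-list offset accumulation with early return; objective: simpler.

-- ===== PORT A =====
-- loop over var_dict.values() with running offset `count`; early return on the first list containing var_name
def find_var_idx_go (var_name : String) (count : Int) : List (String × List String) → Option Int
  | [] => none
  | (_, var_list) :: rest =>
    if var_name ∈ var_list then
      match PySem.List.index? var_list var_name with
      | some i => some (count + (i : Int))
      | none => none   -- unreachable: membership just checked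
    else
      find_var_idx_go var_name (count + (var_list.length : Int)) rest

def find_var_idx (var_name : String) (var_dict : List (String × List String)) : Option Int :=
  find_var_idx_go var_name 0 var_dict

-- ===== PORT B =====
def find_var_idx_alt (var_name : String) (var_dict : List (String × List String)) : Option Int :=
  let flat := var_dict.flatMap (fun p => p.2)
  if var_name ∈ flat then (PySem.List.index? flat var_name).map (fun i => (i : Int)) else none

-- ===== PRECONDITION & SPEC =====
def Spec_find_var_idx (var_name : String) (var_dict : List (String × List String)) (out : Option Int) : Prop := out = find_var_idx_alt var_name var_dict
instance (var_name : String) (var_dict : List (String × List String)) (out : Option Int) : Decidable (Spec_find_var_idx var_name var_dict out) := by unfold Spec_find_var_idx; infer_instance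

-- ===== CLAIM (what is proved, stated in full; the proofs are below) =====
def Claim_equal_find_var_idx : Prop := ∀ (var_name : String) (var_dict : List (String × List String)), Dom_find_var_idx var_name var_dict → Spec_find_var_idx var_name var_dict (find_var_idx var_name var_dict)

-- ===== LEMMAS AND PROOFS =====

theorem index?_append_of_not_mem {α : Type} [DecidableEq α] (l t : List α) (v : α)
    (h : v ∉ l) :
    PySem.List.index? (l ++ t) v = (PySem.List.index? t v).map (fun i => i + l.length) := by
  induction l with
  | nil => simp [Option.map_id']
  | cons x xs ih =>
    have hx : x ≠ v := fun e => h (e ▸ List.mem_cons_self)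
    have hxs : v ∉ xs := fun m => h (List.mem_cons_of_mem _ m)
    rw [List.cons_append, PySem.List.index?_cons_of_ne (xs ++ t) hx, ih hxs]
    cases PySem.List.index? t v <;> simp <;> omega

theorem find_var_idx_go_eq (var_name : String) (count : Int)
    (l : List (String × List String)) :
    find_var_idx_go var_name count l =
      (if var_name ∈ l.flatMap (fun p => p.2) then
        (PySem.List.index? (l.flatMap (fun p => p.2)) var_name).map (fun i => count + (i : Int))
      else none) := by
  induction l generalizing count with
  | nil => simp [find_var_idx_go]
  | cons hd tl ih =>
    obtain ⟨k, lst⟩ := hd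
    rw [List.flatMap_cons]
    by_cases hm : var_name ∈ lst
    · have hsome : (PySem.List.index? lst var_name).isSome := by
        rw [PySem.List.index?_isSome_iff]; exact hm
      obtain ⟨i, hi⟩ := Option.isSome_iff_exists.mp hsome
      simp only [find_var_idx_go, if_pos hm, hi]
      rw [PySem.List.index?_append_of_mem _ hm, hi]
      simp [List.mem_append, hm]
    · simp only [find_var_idx_go, if_neg hm, ih]
      rw [index?_append_of_not_mem _ _ _ hm]
      by_cases ht : var_name ∈ tl.flatMap (fun p => p.2)
      · simp only [List.mem_append, hm, ht, or_true, if_pos]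
        cases PySem.List.index? (tl.flatMap (fun p => p.2)) var_name <;> (simp; try ring)
      · simp [List.mem_append, hm, ht]

-- ===== VERDICT (by name: the statement is the Claim_ definition above) =====
theorem find_var_idx_spec : Claim_equal_find_var_idx := by
  intro var_name var_dict _
  unfold Spec_find_var_idx find_var_idx find_var_idx_alt
  rw [find_var_idx_go_eq]
  dsimp only
  split_ifs with h
  · simp
  · rfl
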